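-- pv_equiv track=rewrite | github.com/Victomas97/DAILYHACKLLEIDA-2 | program3.py | get_forat
-- ===== SOURCE A (Python) =====
-- def get_forat(time, person_id, size, offset, llibre_no_disp):  # TODO: Refactor This
--     cont = 0
--     if llibre_no_disp != None:
--         if offset + size >= len(time[person_id]):
--             return -1
--         for x in range(offset, len(time[person_id])):
--             if time[person_id][x] < 3 and llibre_no_disp[0] >= x >= llibre_no_disp[1]:
--                 cont += 1
--             else:
--                 cont = 0
--             if cont == size:
--                 return (x + 1) - cont
--     else:
--         if offset + size >= len(time[person_id]):
--             return -1
--         for x in range(offset, len(time[person_id])):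
--             if time[person_id][x] < 3:
--                 cont += 1
--             else:
--                 cont = 0
--             if cont == size:
--                 return (x + 1) - cont
--     return -1
-- ===== SOURCE B (Python) =====
-- def get_forat(time, person_id, size, offset, llibre_no_disp):
--     slots = time[person_id]
--     n = len(slots)
--     if offset + size >= n:
--         return -1
--     goods = [slots[x] < 3 and (llibre_no_disp is None or llibre_no_disp[0] >= x >= llibre_no_disp[1])
--              for x in range(offset, n)]
--     for s in range(len(goods) - size + 1):
--         if all(goods[s:s + size]):
--             return offset + s
--     return -1
-- ===== Notes on version B (the rewrite author's own statement) =====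
-- stated objective: alternative
-- what changed: Replaces A's duplicated run-length-counter loops (cont incremented/reset per element, returning (x+1)-cont) with a single pass that materialises the availability booleans once and then scans window starts, returning the first s with all(goods[s:s+size]).
-- intended difference: For size <= 0 with the length guard passed, A returns -1 (size < 0) or 1 + the first unavailable index (size = 0, an accident of its cont == size check), while B returns offset, the start of the empty run found immediately, which is the intended 'first gap of the requested size' on this degenerate request. — e.g. on get_forat([(0, [5])], 0, 0, 0, none): A returns 1, B returns 0
import Mathlib
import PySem

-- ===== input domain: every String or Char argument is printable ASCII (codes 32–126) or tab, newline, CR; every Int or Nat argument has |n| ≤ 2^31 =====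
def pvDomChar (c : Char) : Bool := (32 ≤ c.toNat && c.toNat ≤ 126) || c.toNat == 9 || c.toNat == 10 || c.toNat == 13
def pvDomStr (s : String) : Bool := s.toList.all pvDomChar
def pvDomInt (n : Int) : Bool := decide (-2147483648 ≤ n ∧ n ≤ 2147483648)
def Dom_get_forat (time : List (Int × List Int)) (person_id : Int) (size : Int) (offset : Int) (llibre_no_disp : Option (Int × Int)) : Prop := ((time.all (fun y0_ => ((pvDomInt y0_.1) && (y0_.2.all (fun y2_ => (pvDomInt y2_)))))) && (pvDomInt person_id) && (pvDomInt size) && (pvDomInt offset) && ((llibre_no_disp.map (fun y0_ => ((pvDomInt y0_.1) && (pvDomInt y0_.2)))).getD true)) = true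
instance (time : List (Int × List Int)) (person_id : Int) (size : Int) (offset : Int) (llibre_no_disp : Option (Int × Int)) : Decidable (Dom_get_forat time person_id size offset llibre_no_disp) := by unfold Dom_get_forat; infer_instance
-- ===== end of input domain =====

-- B replaces A's run-length counter with an explicit availability list and a window scan
-- ("first start s such that all of goods[s:s+size]") — an alternative algorithm of similar cost.
-- On size ≤ 0 (with the length guard passed) B intentionally differs, see D_get_forat below.

-- ===== PORT A =====
-- A's for-loop with its running counter `cont`; returns (x+1)-cont when cont hits size.
-- (`.getD 3` after pyGet? is unreachable under Pre_get_forat: Python raises IndexError there.)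
def pvLoopA (c : Int → Bool) (size : Int) : List Int → Int → Int
  | [], _ => -1
  | x :: xs, cont =>
    let cont' := if c x then cont + 1 else 0
    if cont' = size then (x + 1) - cont' else pvLoopA c size xs cont'

def get_forat (time : List (Int × List Int)) (person_id : Int) (size : Int) (offset : Int) (llibre_no_disp : Option (Int × Int)) : Int :=
  match (PySem.Dict.mk time).get? person_id with
  | none => 0   -- KeyError in Python; excluded by Pre_get_forat
  | some lst =>
    match llibre_no_disp with
    | some l =>   -- llibre_no_disp != None branch
      if offset + size ≥ (lst.length : Int) then -1
      else pvLoopA (fun x => decide ((PySem.List.pyGet? lst x).getD 3 < 3 ∧ l.1 ≥ x ∧ x ≥ l.2))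
             size (PySem.List.pyRange offset (lst.length : Int) 1) 0
    | none =>
      if offset + size ≥ (lst.length : Int) then -1
      else pvLoopA (fun x => decide ((PySem.List.pyGet? lst x).getD 3 < 3))
             size (PySem.List.pyRange offset (lst.length : Int) 1) 0

-- ===== PORT B =====
-- availability of absolute index x (the `goods` comprehension of Source B)
def pvGood (slots : List Int) (llibre : Option (Int × Int)) (x : Int) : Bool :=
  decide ((PySem.List.pyGet? slots x).getD 3 < 3) &&
    (match llibre with
     | none => true
     | some l => decide (l.1 ≥ x) && decide (x ≥ l.2))

-- `for s in range(...): if all(goods[s:s+size]): return offset + s` of Source B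
def pvFindStart (goods : List Bool) (size : Int) (offset : Int) : List Int → Int
  | [] => -1
  | s :: ss =>
    if (PySem.List.slice goods (some s) (some (s + size))).all (fun b => b) then offset + s
    else pvFindStart goods size offset ss

def get_forat_alt (time : List (Int × List Int)) (person_id : Int) (size : Int) (offset : Int) (llibre_no_disp : Option (Int × Int)) : Int :=
  match (PySem.Dict.mk time).get? person_id with
  | none => 0   -- KeyError in Python; excluded by Pre_get_forat
  | some slots =>
    if offset + size ≥ (slots.length : Int) then -1
    else
      let goods := (PySem.List.pyRange offset (slots.length : Int) 1).map (pvGood slots llibre_no_disp)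
      pvFindStart goods size offset (PySem.List.pyRange 0 ((goods.length : Int) - size + 1) 1)

-- ===== PRECONDITION & SPEC =====
-- the slot list of person_id: first matching entry of the association list (the dict lookup)
def pvSlots (time : List (Int × List Int)) (person_id : Int) : Option (List Int) :=
  (time.find? (fun p => p.1 == person_id)).map (fun p => p.2)

-- its length, 0 when the key is missing (only used under pvSlots ≠ none)
def pvSlotsLen (time : List (Int × List Int)) (person_id : Int) : Int :=
  (((pvSlots time person_id).getD []).length : Int)

-- Pre_ excludes exactly the inputs where the Python raises: a missing person_id key (KeyError),
-- and offset < -len(time[person_id]) with the length guard not taken (IndexError on lst[x]).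
def Pre_get_forat (time : List (Int × List Int)) (person_id : Int) (size : Int) (offset : Int) (llibre_no_disp : Option (Int × Int)) : Prop :=
  pvSlots time person_id ≠ none ∧
    (offset + size ≥ pvSlotsLen time person_id ∨ -(pvSlotsLen time person_id) ≤ offset)
instance (time : List (Int × List Int)) (person_id : Int) (size : Int) (offset : Int) (llibre_no_disp : Option (Int × Int)) : Decidable (Pre_get_forat time person_id size offset llibre_no_disp) := by unfold Pre_get_forat; infer_instance

def pvWitness_get_forat : (List (Int × List Int)) × Int × Int × Int × (Option (Int × Int)) :=
  ([(0, [0, 1])], 0, 1, 0, none)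

-- On size ≤ 0 with the length guard passed, A returns -1 (size < 0) or 1 + the first
-- unavailable index (size = 0, an accident of its cont == size check), while B returns offset —
-- the start of the empty/degenerate run found immediately, the intended reading of
-- "first gap of the requested size".
def D_get_forat (time : List (Int × List Int)) (person_id : Int) (size : Int) (offset : Int) (llibre_no_disp : Option (Int × Int)) : Prop :=
  pvSlots time person_id ≠ none ∧ size ≤ 0 ∧ offset + size < pvSlotsLen time person_id
instance (time : List (Int × List Int)) (person_id : Int) (size : Int) (offset : Int) (llibre_no_disp : Option (Int × Int)) : Decidable (D_get_forat time person_id size offset llibre_no_disp) := by unfold D_get_forat; infer_instance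

def Spec_get_forat (time : List (Int × List Int)) (person_id : Int) (size : Int) (offset : Int) (llibre_no_disp : Option (Int × Int)) (out : Int) : Prop := ¬ D_get_forat time person_id size offset llibre_no_disp → out = get_forat_alt time person_id size offset llibre_no_disp
instance (time : List (Int × List Int)) (person_id : Int) (size : Int) (offset : Int) (llibre_no_disp : Option (Int × Int)) (out : Int) : Decidable (Spec_get_forat time person_id size offset llibre_no_disp out) := by unfold Spec_get_forat; infer_instance

def pvDiffWitness_get_forat : (List (Int × List Int)) × Int × Int × Int × (Option (Int × Int)) :=
  ([(0, [5])], 0, 0, 0, none)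
def pvDiffWitnessOut_get_forat : Int × Int := (1, 0)

-- ===== CLAIM (what is proved, stated in full; the proofs are below) =====
def Claim_unchanged_get_forat : Prop := ∀ (time : List (Int × List Int)) (person_id : Int) (size : Int) (offset : Int) (llibre_no_disp : Option (Int × Int)), Dom_get_forat time person_id size offset llibre_no_disp → Pre_get_forat time person_id size offset llibre_no_disp → Spec_get_forat time person_id size offset llibre_no_disp (get_forat time person_id size offset llibre_no_disp)
def Claim_changed_get_forat : Prop := Dom_get_forat (pvDiffWitness_get_forat.1) (pvDiffWitness_get_forat.2.1) (pvDiffWitness_get_forat.2.2.1) (pvDiffWitness_get_forat.2.2.2.1) (pvDiffWitness_get_forat.2.2.2.2) ∧ Pre_get_forat (pvDiffWitness_get_forat.1) (pvDiffWitness_get_forat.2.1) (pvDiffWitness_get_forat.2.2.1) (pvDiffWitness_get_forat.2.2.2.1) (pvDiffWitness_get_forat.2.2.2.2) ∧ D_get_forat (pvDiffWitness_get_forat.1) (pvDiffWitness_get_forat.2.1) (pvDiffWitness_get_forat.2.2.1) (pvDiffWitness_get_forat.2.2.2.1) (pvDiffWitness_get_forat.2.2.2.2) ∧ get_forat (pvDiffWitness_get_forat.1)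 (pvDiffWitness_get_forat.2.1) (pvDiffWitness_get_forat.2.2.1) (pvDiffWitness_get_forat.2.2.2.1) (pvDiffWitness_get_forat.2.2.2.2) = pvDiffWitnessOut_get_forat.1 ∧ get_forat_alt (pvDiffWitness_get_forat.1) (pvDiffWitness_get_forat.2.1) (pvDiffWitness_get_forat.2.2.1) (pvDiffWitness_get_forat.2.2.2.1) (pvDiffWitness_get_forat.2.2.2.2) = pvDiffWitnessOut_get_forat.2 ∧ pvDiffWitnessOut_get_forat.1 ≠ pvDiffWitnessOut_get_forat.2

-- ===== LEMMAS AND PROOFS =====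

-- the dict lookup of the ports is exactly the first-match lookup pvSlots
theorem pvSlots_eq_get? (time : List (Int × List Int)) (person_id : Int) :
    (PySem.Dict.mk time).get? person_id = pvSlots time person_id := by
  induction time with
  | nil => rfl
  | cons p rest ih =>
    rcases p with ⟨k, v⟩
    rw [PySem.Dict.get?_mk_cons]
    by_cases hk : k == person_id
    · simp [pvSlots, hk]
    · simp only [pvSlots, List.find?_cons] at ih ⊢
      simp only [hk, Bool.false_eq_true, if_false] at ih ⊢
      exact ih

-- abstract form of A's loop over the availability (Bool) sequence, position carried explicitly
def pvRunScan (size : Int) : List Bool → Int → Int → Int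
  | [], _, _ => -1
  | b :: g, x, cont =>
    let cont' := if b then cont + 1 else 0
    if cont' = size then (x + 1) - cont' else pvRunScan size g (x + 1) cont'

-- common specification: first suffix whose first k entries are all true, reported by position
def pvSpecScan (k : Nat) : List Bool → Int → Int
  | [], _ => -1
  | b :: g, base => if (b :: g).take k = List.replicate k true then base else pvSpecScan k g (base + 1)

-- A's loop on the range equals the abstract run scan on the mapped Bool list
theorem pvLoopA_eq_runScan (c : Int → Bool) (size b : Int) :
    ∀ (n : Nat) (a cont : Int), (b - a).toNat = n →
      pvLoopA c size (PySem.List.pyRange a b 1) cont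
        = pvRunScan size ((PySem.List.pyRange a b 1).map c) a cont := by
  intro n
  induction n with
  | zero =>
    intro a cont h
    rw [PySem.List.pyRange_one_eq_nil (by omega)]
    simp [pvLoopA, pvRunScan]
  | succ n ih =>
    intro a cont h
    rw [PySem.List.pyRange_one_cons (by omega)]
    simp only [List.map_cons, pvLoopA, pvRunScan]
    by_cases he : (if c a then cont + 1 else 0) = size
    · simp only [if_pos he]
    · simp only [if_neg he]
      exact ih (a + 1) _ (by omega)

theorem pvSpecScan_short (k : Nat) : ∀ (g : List Bool) (base : Int), g.length < k →
    pvSpecScan k g base = -1 := by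
  intro g
  induction g with
  | nil => intro base _; rfl
  | cons b g ih =>
    intro base h
    have hne : (b :: g).take k ≠ List.replicate k true := by
      intro he
      have := congrArg List.length he
      simp only [List.length_take, List.length_replicate, List.length_cons] at this
      simp only [List.length_cons] at h
      omega
    simp only [pvSpecScan, if_neg hne]
    simp only [List.length_cons] at h
    exact ih _ (by omega)

theorem pvTake_replicate_false (c k : Nat) (h : c < k) (g : List Bool) :
    List.take k (List.replicate c true ++ false :: g) ≠ List.replicate k true := by
  intro he
  have h1 : (List.take k (List.replicate c true ++ false :: g))[c]? = (List.replicate k true)[c]? := by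
    rw [he]
  rw [List.getElem?_take] at h1
  simp [h] at h1

theorem pvSpecScan_false_block (k : Nat) :
    ∀ (c : Nat) (g : List Bool) (base : Int), c < k →
      pvSpecScan k (List.replicate c true ++ false :: g) base
        = pvSpecScan k g (base + c + 1) := by
  intro c
  induction c with
  | zero =>
    intro g base h
    simp only [List.replicate_zero, List.nil_append, pvSpecScan,
      if_neg (by simpa using pvTake_replicate_false 0 k h g)]
    norm_num
  | succ c ih =>
    intro g base h
    have hl : List.replicate (c + 1) true ++ false :: g
        = true :: (List.replicate c true ++ false :: g) := by
      simp [List.replicate_succ]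
    rw [hl]
    have hne := pvTake_replicate_false (c + 1) k h g
    rw [hl] at hne
    simp only [pvSpecScan, if_neg hne]
    rw [ih g (base + 1) (by omega)]
    congr 1
    push_cast
    ring

theorem pvSpecScan_unfold (k : Nat) (l : List Bool) (base : Int) (hl : l ≠ []) :
    pvSpecScan k l base
      = if l.take k = List.replicate k true then base else pvSpecScan k l.tail (base + 1) := by
  cases l with
  | nil => exact absurd rfl hl
  | cons b g => rfl

theorem pvRunScan_eq_specScan (size : Int) (hs : 1 ≤ size) :
    ∀ (g : List Bool) (x cont : Int), 0 ≤ cont → cont < size →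
      pvRunScan size g x cont
        = pvSpecScan size.toNat (List.replicate cont.toNat true ++ g) (x - cont) := by
  intro g
  induction g with
  | nil =>
    intro x cont h0 h1
    rw [List.append_nil]
    refine (pvSpecScan_short _ _ _ ?_).symm
    simp only [List.length_replicate]
    omega
  | cons b g ih =>
    intro x cont h0 h1
    cases b with
    | true =>
      simp only [pvRunScan, if_true]
      by_cases he : cont + 1 = size
      · rw [if_pos he]
        have hk : size.toNat = cont.toNat + 1 := by omega
        have htake : (List.replicate cont.toNat true ++ true :: g).take size.toNat
            = List.replicate size.toNat true := by
          rw [hk, List.take_append]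
          simp [List.replicate_succ']
        rw [pvSpecScan_unfold _ _ _ (by simp), if_pos htake]
        omega
      · rw [if_neg (by omega : ¬ (cont + 1 = size))]
        rw [ih (x + 1) (cont + 1) (by omega) (by omega)]
        have hl : List.replicate (cont + 1).toNat true ++ g
            = List.replicate cont.toNat true ++ true :: g := by
          have h2 : (cont + 1).toNat = cont.toNat + 1 := by omega
          rw [h2, List.replicate_succ', List.append_assoc]
          rfl
        rw [hl]
        congr 1
        ring
    | false =>
      simp only [pvRunScan, Bool.false_eq_true, if_false]
      rw [if_neg (by omega : ¬ ((0:Int) = size))]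
      rw [ih (x + 1) 0 le_rfl (by omega)]
      simp only [Int.toNat_zero, List.replicate_zero, List.nil_append, sub_zero]
      rw [pvSpecScan_false_block size.toNat cont.toNat g (x - cont) (by omega)]
      congr 1
      have hc : ((cont.toNat : Int)) = cont := Int.toNat_of_nonneg h0
      omega

-- shifting B's scan past the head of the goods list
theorem pvFindStart_shift (bb : Bool) (g : List Bool) (size base : Int) (hs : 1 ≤ size) :
    ∀ (n : Nat) (t M : Int), (M - t).toNat = n → 1 ≤ t →
      pvFindStart (bb :: g) size base (PySem.List.pyRange t M 1)
        = pvFindStart g size (base + 1) (PySem.List.pyRange (t - 1) (M - 1) 1) := by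
  intro n
  induction n with
  | zero =>
    intro t M h ht
    rw [PySem.List.pyRange_one_eq_nil (by omega), PySem.List.pyRange_one_eq_nil (by omega)]
    rfl
  | succ n ih =>
    intro t M h ht
    rw [PySem.List.pyRange_one_cons (show t < M by omega),
        PySem.List.pyRange_one_cons (show t - 1 < M - 1 by omega)]
    have hsl : PySem.List.slice (bb :: g) (some t) (some (t + size))
        = PySem.List.slice g (some (t - 1)) (some (t - 1 + size)) := by
      rw [PySem.List.slice_toNat _ (by omega) (by omega),
          PySem.List.slice_toNat _ (by omega) (by omega)]
      have h1 : t.toNat = (t - 1).toNat + 1 := by omega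
      rw [h1, List.drop_succ_cons]
      have h2 : (t + size).toNat - ((t - 1).toNat + 1) = (t - 1 + size).toNat - (t - 1).toNat := by
        omega
      rw [h2]
    simp only [pvFindStart, hsl]
    split
    · omega
    · rw [ih (t + 1) M (by omega) (by omega)]
      norm_num

theorem pvFindStart_eq_specScan (size : Int) (hs : 1 ≤ size) :
    ∀ (g : List Bool) (base : Int),
      pvFindStart g size base (PySem.List.pyRange 0 ((g.length : Int) - size + 1) 1)
        = pvSpecScan size.toNat g base := by
  intro g
  induction g with
  | nil =>
    intro base
    rw [PySem.List.pyRange_one_eq_nil (by simp; omega)]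
    rfl
  | cons b g ih =>
    intro base
    by_cases hlen : ((b :: g).length : Int) < size
    · rw [PySem.List.pyRange_one_eq_nil (by omega)]
      refine (pvSpecScan_short _ _ _ ?_).symm
      simp only [List.length_cons] at hlen ⊢
      omega
    · rw [PySem.List.pyRange_one_cons (by omega)]
      simp only [pvFindStart]
      rw [pvSpecScan_unfold size.toNat (b :: g) base (by simp)]
      have hslice : PySem.List.slice (b :: g) (some 0) (some (0 + size))
          = (b :: g).take size.toNat := by
        rw [zero_add, PySem.List.slice_toNat _ le_rfl (by omega)]
        simp
      have hcond : (((b :: g).take size.toNat).all fun x => x) = true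
          ↔ (b :: g).take size.toNat = List.replicate size.toNat true := by
        rw [List.all_eq_true, List.eq_replicate_iff]
        have hl2 : ((b :: g).take size.toNat).length = size.toNat := by
          rw [List.length_take]
          simp only [List.length_cons] at hlen ⊢
          omega
        simp [hl2]
      rw [hslice]
      by_cases hall : (((b :: g).take size.toNat).all fun x => x) = true
      · rw [if_pos hall, if_pos (hcond.mp hall)]
        omega
      · rw [if_neg hall, if_neg (fun hh => hall (hcond.mpr hh))]
        have hsh := pvFindStart_shift b g size base hs
          ((((b :: g).length : Int) - size + 1) - 1).toNat 1 (((b :: g).length : Int) - size + 1)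
          rfl le_rfl
        have hL : ((b :: g).length : Int) - size + 1 - 1 = (g.length : Int) - size + 1 := by
          simp only [List.length_cons]
          push_cast
          ring
        rw [show (1 : Int) - 1 = 0 by norm_num, hL] at hsh
        rw [show (0 : Int) + 1 = 1 by norm_num, hsh, ih (base + 1)]
        simp only [List.tail_cons]

theorem get_forat_spec : Claim_unchanged_get_forat := by
  intro time person_id size offset llibre_no_disp hdom hpre hnd
  unfold get_forat get_forat_alt
  unfold Pre_get_forat at hpre
  unfold D_get_forat at hnd
  cases hd : (PySem.Dict.mk time).get? person_id with
  | none =>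
    exact absurd ((pvSlots_eq_get? time person_id).symm.trans hd) hpre.1
  | some lst =>
    have hd' : pvSlots time person_id = some lst := (pvSlots_eq_get? time person_id).symm.trans hd
    have hlen : pvSlotsLen time person_id = (lst.length : Int) := by
      unfold pvSlotsLen
      rw [hd']
      rfl
    have hnd' : ¬ (size ≤ 0 ∧ offset + size < (lst.length : Int)) := by
      rw [hd', hlen] at hnd
      intro hcontra
      exact hnd ⟨by simp, hcontra.1, hcontra.2⟩
    cases llibre_no_disp with
    | none =>
      by_cases hg : offset + size ≥ (lst.length : Int)
      · simp only [if_pos hg]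
      · have hsz : 1 ≤ size := by omega
        simp only [if_neg hg]
        rw [pvLoopA_eq_runScan _ size (lst.length : Int)
              (((lst.length : Int) - offset).toNat) offset 0 rfl]
        have hmap : (PySem.List.pyRange offset (lst.length : Int) 1).map
              (fun x => decide ((PySem.List.pyGet? lst x).getD 3 < 3))
            = (PySem.List.pyRange offset (lst.length : Int) 1).map (pvGood lst none) :=
          List.map_congr_left fun x _ => by simp [pvGood]
        rw [hmap, pvRunScan_eq_specScan size hsz _ offset 0 le_rfl (by omega)]
        simp only [Int.toNat_zero, List.replicate_zero, List.nil_append, sub_zero]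
        rw [← pvFindStart_eq_specScan size hsz]
    | some l =>
      by_cases hg : offset + size ≥ (lst.length : Int)
      · simp only [if_pos hg]
      · have hsz : 1 ≤ size := by omega
        simp only [if_neg hg]
        rw [pvLoopA_eq_runScan _ size (lst.length : Int)
              (((lst.length : Int) - offset).toNat) offset 0 rfl]
        have hmap : (PySem.List.pyRange offset (lst.length : Int) 1).map
              (fun x => decide ((PySem.List.pyGet? lst x).getD 3 < 3 ∧ l.1 ≥ x ∧ x ≥ l.2))
            = (PySem.List.pyRange offset (lst.length : Int) 1).map (pvGood lst (some l)) :=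
          List.map_congr_left fun x _ => by simp [pvGood]
        rw [hmap, pvRunScan_eq_specScan size hsz _ offset 0 le_rfl (by omega)]
        simp only [Int.toNat_zero, List.replicate_zero, List.nil_append, sub_zero]
        rw [← pvFindStart_eq_specScan size hsz]
theorem get_forat_changed : Claim_changed_get_forat := by unfold Claim_changed_get_forat; decide
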